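-- pv_equiv track=rewrite | github.com/chantelprows/bioinformatics-algorithms | venv/Lib/CS 418/Part 3/contigGeneration.py | graphMaker
-- ===== SOURCE A (Python) =====
-- def graphMaker(dnaList):
--     graph = {}
--     for dna in dnaList:
--         tmp = []
--         for dna1 in dnaList:
--             if dna[:-1] == dna1[:-1]:
--                 tmp.append(dna1[1:])
--         graph[dna[:-1]] = tmp
--     return graph
-- ===== SOURCE B (Python) =====
-- def graphMaker(dnaList):
--     # One pass with two parallel lists (no dict until the end): keys holds the
--     # distinct (k-1)-prefixes in first-occurrence order, groups[i] the suffixes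
--     # whose prefix is keys[i], in original order; zip them into the dict at the end.
--     keys = []
--     groups = []
--     for dna in dnaList:
--         prefix = dna[:-1]
--         if prefix in keys:
--             groups[keys.index(prefix)].append(dna[1:])
--         else:
--             keys.append(prefix)
--             groups.append([dna[1:]])
--     return dict(zip(keys, groups))
-- ===== Notes on version B (the rewrite author's own statement) =====
-- stated objective: faster
-- what changed: Replaces A's nested rescan of the whole list for every element (rebuilding each group once per member) by a single pass maintaining two parallel lists of distinct prefixes and their suffix groups, zipped into the dict at the end.
import Mathlib
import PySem

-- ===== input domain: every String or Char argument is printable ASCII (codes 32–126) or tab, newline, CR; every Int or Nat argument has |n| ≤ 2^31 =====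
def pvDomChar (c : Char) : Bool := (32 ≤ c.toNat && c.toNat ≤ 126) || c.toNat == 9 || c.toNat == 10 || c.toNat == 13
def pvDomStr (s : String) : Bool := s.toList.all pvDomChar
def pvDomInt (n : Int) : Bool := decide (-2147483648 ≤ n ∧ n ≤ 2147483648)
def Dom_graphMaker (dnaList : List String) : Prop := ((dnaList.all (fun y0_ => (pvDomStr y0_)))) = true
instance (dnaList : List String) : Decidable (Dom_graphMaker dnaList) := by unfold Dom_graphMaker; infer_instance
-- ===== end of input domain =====

-- B replaces A's quadratic rescan of the whole list for every element by a single pass that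
-- maintains two parallel lists (distinct prefixes / their suffix groups) and zips them at the
-- end (objective: faster; no dict is built during the scan).

-- ===== PORT A =====
-- for each dna: rescan the whole list collecting suffixes of equal (:-1)-prefix, then graph[dna[:-1]] = tmp
def graphMaker (dnaList : List String) : List (String × List String) :=
  (dnaList.foldl (fun graph dna =>
      graph.insert (PySem.Str.slice dna none (some (-1)))
        (dnaList.foldl (fun tmp dna1 =>
          if PySem.Str.slice dna none (some (-1)) = PySem.Str.slice dna1 none (some (-1))
          then tmp ++ [PySem.Str.slice dna1 (some 1) none] else tmp) []))
    PySem.Dict.empty).items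

-- ===== PORT B =====
-- one pass over dnaList with state (keys, groups); 'groups[keys.index(prefix)].append(...)'
-- is List.set at that index (the branch is guarded by 'prefix in keys', so the index exists
-- and the getD defaults are never taken); 'dict(zip(keys, groups))' is List.zip (the keys are
-- distinct by construction, so the zipped association list is exactly the dict's items).
def graphMaker_alt (dnaList : List String) : List (String × List String) :=
  let st := dnaList.foldl (fun (st : List String × List (List String)) dna =>
      let pre := PySem.Str.slice dna none (some (-1))
      if pre ∈ st.1 then
        let i := (PySem.List.index? st.1 pre).getD 0
        (st.1, st.2.set i (st.2.getD i [] ++ [PySem.Str.slice dna (some 1) none]))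
      else
        (st.1 ++ [pre], st.2 ++ [[PySem.Str.slice dna (some 1) none]]))
    ([], [])
  st.1.zip st.2

-- ===== PRECONDITION & SPEC =====
def Spec_graphMaker (dnaList : List String) (out : List (String × List String)) : Prop := out = graphMaker_alt dnaList
instance (dnaList : List String) (out : List (String × List String)) : Decidable (Spec_graphMaker dnaList out) := by unfold Spec_graphMaker; infer_instance

-- ===== CLAIM (what is proved, stated in full; the proofs are below) =====
def Claim_equal_graphMaker : Prop := ∀ (dnaList : List String), Dom_graphMaker dnaList → Spec_graphMaker dnaList (graphMaker dnaList)

-- ===== LEMMAS AND PROOFS =====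

-- the (k-1)-prefix dna[:-1] and the suffix dna[1:]
def pvKey (s : String) : String := PySem.Str.slice s none (some (-1))
def pvSuf (s : String) : String := PySem.Str.slice s (some 1) none
-- first-occurrence order of the prefixes of P, appended after D
def pvKeys (P : List String) (D : List String) : List String :=
  P.foldl (fun D x => if pvKey x ∈ D then D else D ++ [pvKey x]) D
-- the group of prefix c: suffixes of the members of L whose prefix is c, in order
def pvGrp (L : List String) (c : String) : List String :=
  (L.filter (fun y => decide (c = pvKey y))).map pvSuf

theorem mem_pvKeys (P : List String) : ∀ (D : List String) (c : String),
    c ∈ pvKeys P D ↔ c ∈ D ∨ c ∈ P.map pvKey := by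
  induction P with
  | nil => simp [pvKeys]
  | cons x P ih =>
    intro D c
    simp only [pvKeys, List.foldl_cons] at *
    rw [ih]
    simp only [List.map_cons, List.mem_cons]
    by_cases h : pvKey x ∈ D
    · simp only [if_pos h]
      constructor
      · exact fun h' => h'.elim Or.inl (fun h2 => Or.inr (Or.inr h2))
      · rintro (h1 | h2 | h3)
        · exact Or.inl h1
        · exact Or.inl (h2 ▸ h)
        · exact Or.inr h3
    · simp only [if_neg h, List.mem_append, List.mem_singleton]
      constructor
      · rintro ((h1 | h2) | h3)
        · exact Or.inl h1
        · exact Or.inr (Or.inl h2)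
        · exact Or.inr (Or.inr h3)
      · rintro (h1 | h2 | h3)
        · exact Or.inl (Or.inl h1)
        · exact Or.inl (Or.inr h2)
        · exact Or.inr h3

theorem pvKeys_nodup (P : List String) : ∀ (D : List String), D.Nodup → (pvKeys P D).Nodup := by
  induction P with
  | nil => intro D hD; simpa [pvKeys] using hD
  | cons x P ih =>
    intro D hD
    simp only [pvKeys, List.foldl_cons]
    by_cases h : pvKey x ∈ D
    · simpa [if_pos h, pvKeys] using ih D hD
    · have : (D ++ [pvKey x]).Nodup := by
        simp [List.nodup_append, hD]
        exact fun a ha hax => h (hax ▸ ha)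
      simpa [if_neg h, pvKeys] using ih (D ++ [pvKey x]) this

theorem contains_map_pairs (F : String → List String) (D : List String) (c : String) :
    (PySem.Dict.mk (D.map (fun c => (c, F c))) : PySem.Dict String (List String)).contains c
      = decide (c ∈ D) := by
  induction D with
  | nil => simp [PySem.Dict.contains]
  | cons d D ih =>
    simp only [List.map_cons, PySem.Dict.contains, List.any_cons] at ih ⊢
    by_cases h : d = c
    · simp [h]
    · simp only [beq_eq_false_iff_ne.mpr h, Bool.false_or, ih]
      simp only [List.mem_cons, decide_eq_decide]
      exact ⟨Or.inr, fun hc => hc.elim (fun hh => absurd hh.symm h) id⟩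

theorem pvKeys_append (A B D : List String) : pvKeys (A ++ B) D = pvKeys B (pvKeys A D) := by
  simp [pvKeys, List.foldl_append]

theorem pvGrp_append_singleton (L : List String) (x : String) (c : String) :
    pvGrp (L ++ [x]) c = if c = pvKey x then pvGrp L c ++ [pvSuf x] else pvGrp L c := by
  simp only [pvGrp, List.filter_append, List.map_append]
  by_cases h : c = pvKey x <;> simp [h]

theorem pvGrp_eq_nil_of_not_mem (L : List String) (c : String) (h : c ∉ L.map pvKey) :
    pvGrp L c = [] := by
  rw [pvGrp, List.filter_eq_nil_iff.mpr, List.map_nil]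
  intro y hy
  simp only [decide_eq_true_eq]
  intro hcontra
  exact h (hcontra ▸ List.mem_map_of_mem hy)

-- A's outer loop: inserting (pvKey x, F (pvKey x)) into a dict of the form D.map (c, F c)
-- only appends fresh keys (an overwrite re-stores the same value)
theorem A_fold_items (F : String → List String) (P : List String) : ∀ (D : List String),
    (P.foldl (fun g x => g.insert (pvKey x) (F (pvKey x)))
        (PySem.Dict.mk (D.map (fun c => (c, F c))) : PySem.Dict String (List String))).items
      = (pvKeys P D).map (fun c => (c, F c)) := by
  induction P with
  | nil => intro D; simp [pvKeys]
  | cons x P ih =>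
    intro D
    simp only [List.foldl_cons]
    have hstep : (PySem.Dict.mk (D.map (fun c => (c, F c))) : PySem.Dict String (List String)).insert (pvKey x) (F (pvKey x))
        = (PySem.Dict.mk ((if pvKey x ∈ D then D else D ++ [pvKey x]).map (fun c => (c, F c)))) := by
      by_cases h : pvKey x ∈ D
      · simp only [PySem.Dict.insert, contains_map_pairs, h, decide_true, if_pos]
        congr 1
        rw [List.map_map]
        apply List.map_congr_left
        intro c hcD
        by_cases hcx : c = pvKey x <;> simp [hcx]
      · simp [PySem.Dict.insert, h]
    rw [hstep, ih]
    simp only [pvKeys, List.foldl_cons]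

-- updating the group at the index of key c inside a map-shaped group list
theorem set_map_at_index (F : String → List String) (s : String) (c : String) :
    ∀ (K : List String) (i : Nat), K.Nodup → PySem.List.index? K c = some i →
    (K.map F).set i ((K.map F).getD i [] ++ [s])
      = K.map (fun c' => if c' = c then F c' ++ [s] else F c') := by
  intro K
  induction K with
  | nil => intro i _ hidx; simp [PySem.List.index?, List.idxOf?] at hidx
  | cons k K ih =>
    intro i hnd hidx
    by_cases hk : k = c
    · subst hk
      rw [PySem.List.index?_cons_self] at hidx
      obtain rfl : (0 : Nat) = i := Option.some.inj hidx
      have hknotin : k ∉ K := (List.nodup_cons.mp hnd).1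
      simp only [List.map_cons, List.set_cons_zero, List.getD_cons_zero]
      congr 1
      symm
      apply List.map_congr_left
      intro c' hc'
      have : c' ≠ k := fun hh => hknotin (hh ▸ hc')
      simp [this]
    · rw [PySem.List.index?_cons_of_ne K hk] at hidx
      obtain ⟨j, hj, rfl⟩ := Option.map_eq_some_iff.mp hidx
      simp only [List.map_cons, List.set_cons_succ, List.getD_cons_succ, if_neg hk]
      congr 1
      exact ih j (List.nodup_cons.mp hnd).2 hj

-- B's step function, written with the pvKey/pvSuf abbreviations (definitionally the
-- lambda inside graphMaker_alt)
def pvStep (st : List String × List (List String)) (dna : String) :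
    List String × List (List String) :=
  if pvKey dna ∈ st.1 then
    (st.1, st.2.set ((PySem.List.index? st.1 (pvKey dna)).getD 0)
      (st.2.getD ((PySem.List.index? st.1 (pvKey dna)).getD 0) [] ++ [pvSuf dna]))
  else
    (st.1 ++ [pvKey dna], st.2 ++ [[pvSuf dna]])

theorem pvStep_eq : (fun (st : List String × List (List String)) dna =>
      let pre := PySem.Str.slice dna none (some (-1))
      if pre ∈ st.1 then
        let i := (PySem.List.index? st.1 pre).getD 0
        (st.1, st.2.set i (st.2.getD i [] ++ [PySem.Str.slice dna (some 1) none]))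
      else
        (st.1 ++ [pre], st.2 ++ [[PySem.Str.slice dna (some 1) none]]))
    = pvStep := by
  funext st dna
  simp only [pvStep, pvKey, pvSuf]

-- one step of B from the invariant state
theorem pvStep_invariant (Pdone : List String) (x : String) :
    pvStep (pvKeys Pdone [], (pvKeys Pdone []).map (pvGrp Pdone)) x
      = (pvKeys (Pdone ++ [x]) [], (pvKeys (Pdone ++ [x]) []).map (pvGrp (Pdone ++ [x]))) := by
  have hKx : pvKeys (Pdone ++ [x]) [] =
      (if pvKey x ∈ pvKeys Pdone [] then pvKeys Pdone [] else pvKeys Pdone [] ++ [pvKey x]) := by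
    rw [pvKeys_append]; simp [pvKeys]
  unfold pvStep
  by_cases h : pvKey x ∈ pvKeys Pdone []
  · rw [if_pos h]
    obtain ⟨i, hidx⟩ := Option.isSome_iff_exists.mp ((PySem.List.index?_isSome_iff _ _).mpr h)
    have hnd := pvKeys_nodup Pdone [] List.nodup_nil
    refine Prod.ext ?_ ?_
    · simp [hKx, if_pos h]
    · simp only [hidx, Option.getD_some]
      rw [set_map_at_index (pvGrp Pdone) (pvSuf x) (pvKey x) (pvKeys Pdone []) i hnd hidx]
      rw [hKx, if_pos h]
      apply List.map_congr_left
      intro c _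
      rw [pvGrp_append_singleton]
  · rw [if_neg h]
    refine Prod.ext ?_ ?_
    · simp [hKx, if_neg h]
    · rw [hKx, if_neg h]
      simp only [List.map_append, List.map_cons, List.map_nil]
      congr 1
      · apply List.map_congr_left
        intro c hc
        have hcx : c ≠ pvKey x := fun hh => h (hh ▸ hc)
        rw [pvGrp_append_singleton, if_neg hcx]
      · have hnotin : pvKey x ∉ Pdone.map pvKey := fun hh =>
          h ((mem_pvKeys Pdone [] (pvKey x)).mpr (Or.inr hh))
        simp [pvGrp_append_singleton,
          pvGrp_eq_nil_of_not_mem Pdone (pvKey x) hnotin]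

-- B's loop invariant: after the processed prefix Pdone, the state holds the distinct
-- prefixes of Pdone in first-occurrence order and their groups, in parallel
theorem B_fold (P : List String) : ∀ (Pdone : List String),
    P.foldl pvStep (pvKeys Pdone [], (pvKeys Pdone []).map (pvGrp Pdone))
    = (pvKeys (Pdone ++ P) [], (pvKeys (Pdone ++ P) []).map (pvGrp (Pdone ++ P))) := by
  induction P with
  | nil => intro Pdone; simp
  | cons x P ih =>
    intro Pdone
    rw [List.foldl_cons, pvStep_invariant Pdone x, ih (Pdone ++ [x])]
    simp

-- A's inner loop builds exactly the group of pvKey dna over the whole list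
theorem inner_loop_eq_grp (dnaList : List String) (dna : String) :
    (dnaList.foldl (fun tmp dna1 =>
        if PySem.Str.slice dna none (some (-1)) = PySem.Str.slice dna1 none (some (-1))
        then tmp ++ [PySem.Str.slice dna1 (some 1) none] else tmp) [])
      = pvGrp dnaList (pvKey dna) := by
  have hf : (fun (tmp : List String) dna1 =>
        if PySem.Str.slice dna none (some (-1)) = PySem.Str.slice dna1 none (some (-1))
        then tmp ++ [PySem.Str.slice dna1 (some 1) none] else tmp)
      = (fun tmp dna1 =>
        if (fun y => decide (pvKey dna = pvKey y)) dna1 = true then tmp ++ [pvSuf dna1] else tmp) := by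
    funext tmp d1
    simp [pvKey, pvSuf]
  rw [hf, PySem.List.foldl_append_if]
  simp [pvGrp]

theorem graphMaker_closed (dnaList : List String) :
    graphMaker dnaList = (pvKeys dnaList []).map (fun c => (c, pvGrp dnaList c)) := by
  unfold graphMaker
  have hf : (fun (graph : PySem.Dict String (List String)) dna =>
      graph.insert (PySem.Str.slice dna none (some (-1)))
        (dnaList.foldl (fun tmp dna1 =>
          if PySem.Str.slice dna none (some (-1)) = PySem.Str.slice dna1 none (some (-1))
          then tmp ++ [PySem.Str.slice dna1 (some 1) none] else tmp) []))
      = (fun g x => g.insert (pvKey x) ((fun c => pvGrp dnaList c) (pvKey x))) := by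
    funext g dna
    rw [inner_loop_eq_grp dnaList dna]
    rfl
  rw [hf]
  exact A_fold_items (fun c => pvGrp dnaList c) dnaList []

theorem zip_map_self (F : String → List String) (K : List String) :
    K.zip (K.map F) = K.map (fun c => (c, F c)) := by
  induction K with
  | nil => rfl
  | cons k K ih => simp [ih]

theorem graphMaker_alt_closed (dnaList : List String) :
    graphMaker_alt dnaList = (pvKeys dnaList []).map (fun c => (c, pvGrp dnaList c)) := by
  unfold graphMaker_alt
  rw [pvStep_eq]
  have h0 : (([], []) : List String × List (List String))
      = (pvKeys ([] : List String) [], (pvKeys ([] : List String) []).map (pvGrp [])) := by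
    simp [pvKeys]
  rw [h0, B_fold dnaList []]
  simpa using zip_map_self (pvGrp dnaList) (pvKeys dnaList [])

-- ===== VERDICT (by name: the statement is the Claim_ definition above) =====
theorem graphMaker_spec : Claim_equal_graphMaker := by
  intro dnaList _
  unfold Spec_graphMaker
  rw [graphMaker_closed, graphMaker_alt_closed]
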